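-- pv_equiv track=rewrite | github.com/xmjlmm/school_learning | 判断字符串是否为数字/常规的.py | notuse_isnumeric
-- ===== SOURCE A (Python) =====
-- def notuse_isnumeric(str:str) -> int:
--     restrict = '1234567890'
--     record_num = []
--     record_str = []
--     count = 0
--     str_str = ''
--     for word in str:
--         if word not in restrict:
--             record_num.append(count)
--             record_str.append(str_str)
--             count = 0
--             str_str = ''
--         else:
--             count += 1
--             str_str = str_str + word
--     record_num.append(count)
--     record_str.append(str_str)
--     max_num = max(record_num)
--     max_str = record_str[record_num.index(max_num)]
--     return (max_str, max_num)
-- ===== SOURCE B (Python) =====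
-- def notuse_isnumeric(str: str) -> int:
--     # One pass, O(1) extra state: keep the current digit run and the best
--     # (first-longest) run seen so far; no record lists, no max()/index passes.
--     best = ''
--     best_len = 0
--     cur = ''
--     cur_len = 0
--     for ch in str:
--         if '0' <= ch <= '9':
--             cur += ch
--             cur_len += 1
--         else:
--             if cur_len > best_len:
--                 best, best_len = cur, cur_len
--             cur, cur_len = '', 0
--     if cur_len > best_len:
--         best, best_len = cur, cur_len
--     return (best, best_len)
-- ===== Notes on version B (the rewrite author's own statement) =====
-- stated objective: faster
-- what changed: Replaces A's accumulation of full record_num/record_str lists followed by three extra selection passes (max(), list.index(), subscript) with a single scan that keeps only the current digit run and the first-longest run seen so far in O(1) extra state.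
import Mathlib
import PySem

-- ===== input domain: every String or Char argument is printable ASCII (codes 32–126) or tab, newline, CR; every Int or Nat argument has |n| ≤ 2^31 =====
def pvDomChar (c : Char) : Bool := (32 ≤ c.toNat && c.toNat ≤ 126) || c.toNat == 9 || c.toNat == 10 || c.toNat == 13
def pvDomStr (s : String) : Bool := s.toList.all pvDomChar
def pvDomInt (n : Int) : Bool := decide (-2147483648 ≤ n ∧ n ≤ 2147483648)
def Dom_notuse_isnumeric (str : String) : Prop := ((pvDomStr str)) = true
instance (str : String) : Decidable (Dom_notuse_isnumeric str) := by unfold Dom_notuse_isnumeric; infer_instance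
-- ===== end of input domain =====

-- B replaces A's record lists plus max()/index()/subscript selection passes by a single
-- O(1)-state scan that keeps only the current run and the first-longest run seen so far.

-- ===== PORT A =====
-- literal port of A's loop body (state = (record_num, record_str, count, str_str); strings as List Char)
def pvAStep (st : List Int × List (List Char) × Int × List Char) (word : Char) :
    List Int × List (List Char) × Int × List Char :=
  if word ∉ (['1','2','3','4','5','6','7','8','9','0'] : List Char) then
    (st.1 ++ [st.2.2.1], st.2.1 ++ [st.2.2.2], 0, [])
  else
    (st.1, st.2.1, st.2.2.1 + 1, st.2.2.2 ++ [word])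

def notuse_isnumeric (str : String) : String × Int :=
  let st := str.toList.foldl pvAStep ([], [], 0, [])
  let record_num := st.1 ++ [st.2.2.1]
  let record_str := st.2.1 ++ [st.2.2.2]
  -- record_num/record_str are nonempty by construction, so the .getD defaults are never taken
  let max_num := (PySem.List.max? record_num (fun x => x)).getD 0
  let max_str :=
    (PySem.List.pyGet? record_str (((PySem.List.index? record_num max_num).getD 0 : Nat) : Int)).getD []
  (String.ofList max_str, max_num)

-- ===== PORT B =====
-- literal port of Source B's loop body (state = (best, best_len, cur, cur_len))
def pvBStep (st : List Char × Int × List Char × Int) (ch : Char) :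
    List Char × Int × List Char × Int :=
  if '0' ≤ ch ∧ ch ≤ '9' then
    (st.1, st.2.1, st.2.2.1 ++ [ch], st.2.2.2 + 1)
  else if st.2.2.2 > st.2.1 then
    (st.2.2.1, st.2.2.2, [], 0)
  else
    (st.1, st.2.1, [], 0)

def notuse_isnumeric_alt (str : String) : String × Int :=
  let st := str.toList.foldl pvBStep ([], 0, [], 0)
  let p := if st.2.2.2 > st.2.1 then (st.2.2.1, st.2.2.2) else (st.1, st.2.1)
  (String.ofList p.1, p.2)

-- ===== PRECONDITION & SPEC =====
def Spec_notuse_isnumeric (str : String) (out : String × Int) : Prop := out = notuse_isnumeric_alt str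
instance (str : String) (out : String × Int) : Decidable (Spec_notuse_isnumeric str out) := by unfold Spec_notuse_isnumeric; infer_instance

-- ===== CLAIM (what is proved, stated in full; the proofs are below) =====
def Claim_equal_notuse_isnumeric : Prop := ∀ (str : String), Dom_notuse_isnumeric str → Spec_notuse_isnumeric str (notuse_isnumeric str)

-- ===== LEMMAS AND PROOFS =====

def pvLenI (s : List Char) : Int := (s.length : Int)

-- the maximal digit runs of cur ++ l, where cur is the pending run; includes every
-- (possibly empty) chunk between non-digits, exactly as A's record_str accumulates them
def pvChunks : List Char → List Char → List (List Char)
  | [], cur => [cur]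
  | c :: l, cur => if '0' ≤ c ∧ c ≤ '9' then pvChunks l (cur ++ [c]) else cur :: pvChunks l []

-- first chunk of maximal length, with its length
def pvPick : List (List Char) → List Char × Int
  | [] => ([], 0)
  | s :: t => let p := pvPick t; if pvLenI s ≥ p.2 then (s, pvLenI s) else p

lemma pvCharClass (c : Char) :
    (c ∈ (['1','2','3','4','5','6','7','8','9','0'] : List Char)) ↔ ('0' ≤ c ∧ c ≤ '9') := by
  simp [List.mem_cons, Char.ext_iff, Char.le_def, UInt32.le_iff_toNat_le, UInt32.ext_iff]
  omega

lemma pvChunks_ne_nil (l cur : List Char) : pvChunks l cur ≠ [] := by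
  induction l generalizing cur with
  | nil => simp [pvChunks]
  | cons c l ih => by_cases h : '0' ≤ c ∧ c ≤ '9' <;> simp [pvChunks, h, ih]

lemma pvPick_snd_eq (ss : List (List Char)) : (pvPick ss).2 = pvLenI (pvPick ss).1 := by
  induction ss with
  | nil => simp [pvPick, pvLenI]
  | cons s t ih => simp only [pvPick]; split_ifs <;> simp [ih]

lemma pvPick_snd_nonneg (ss : List (List Char)) : 0 ≤ (pvPick ss).2 := by
  rw [pvPick_snd_eq]; exact Int.natCast_nonneg _

lemma pvPick_le (ss : List (List Char)) : ∀ x ∈ ss, pvLenI x ≤ (pvPick ss).2 := by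
  induction ss with
  | nil => simp
  | cons s t ih =>
    intro x hx
    rcases List.mem_cons.mp hx with rfl | hx
    · simp only [pvPick]; split_ifs with h
      · exact le_refl _
      · omega
    · simp only [pvPick]; split_ifs with h
      · exact le_trans (ih x hx) (by omega)
      · exact ih x hx

lemma pvPick_mem (ss : List (List Char)) (h : ss ≠ []) : (pvPick ss).1 ∈ ss := by
  induction ss with
  | nil => exact absurd rfl h
  | cons s t ih =>
    simp only [pvPick]; split_ifs with hs
    · simp
    · have ht : t ≠ [] := by
        rintro rfl; simp [pvPick, pvLenI] at hs
      exact List.mem_cons_of_mem _ (ih ht)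

-- A's final three lines (max / index / subscript) compute exactly pvPick on (map length ss, ss)
lemma pvFin_eq_pick (ss : List (List Char)) (h : ss ≠ []) :
    ((PySem.List.pyGet? ss
        (((PySem.List.index? (ss.map pvLenI)
            ((PySem.List.max? (ss.map pvLenI) (fun x => x)).getD 0)).getD 0 : Nat) : Int)).getD [],
      (PySem.List.max? (ss.map pvLenI) (fun x => x)).getD 0) = pvPick ss := by
  induction ss with
  | nil => exact absurd rfl h
  | cons s t ih =>
    rcases eq_or_ne t [] with rfl | ht
    · simp [PySem.List.max?_id_cons, pvPick, pvLenI]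
    · have IH := ih ht
      have hq2 : (pvPick t).2 = pvLenI (pvPick t).1 := pvPick_snd_eq t
      have hqmem : (pvPick t).2 ∈ t.map pvLenI := by
        rw [hq2]; exact List.mem_map_of_mem (pvPick_mem t ht)
      have hle : ∀ x ∈ t.map pvLenI, x ≤ (pvPick t).2 := by
        intro x hx
        rcases List.mem_map.mp hx with ⟨y, hy, rfl⟩
        exact pvPick_le t y hy
      -- the running max over the cons list
      have hfold : (t.map pvLenI).foldl max (pvLenI s) = max (pvLenI s) (pvPick t).2 := by
        have h1 := PySem.List.le_foldl_max (t.map pvLenI) (pvLenI s)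
        have h2 := PySem.List.foldl_max_mem (t.map pvLenI) (pvLenI s)
        have h3 := h1.2 _ hqmem
        rcases h2 with h2 | h2
        · omega
        · have := hle _ h2; omega
      have hmax : (PySem.List.max? ((s :: t).map pvLenI) (fun x => x)).getD 0
          = max (pvLenI s) (pvPick t).2 := by
        rw [List.map_cons, PySem.List.max?_id_cons, Option.getD_some, hfold]
      have hmaxt : (PySem.List.max? (t.map pvLenI) (fun x => x)).getD 0 = (pvPick t).2 :=
        congrArg Prod.snd IH
      by_cases hc : pvLenI s ≥ (pvPick t).2
      · have hm : (PySem.List.max? ((s :: t).map pvLenI) (fun x => x)).getD 0 = pvLenI s := by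
          rw [hmax]; omega
        rw [hm]
        rw [List.map_cons, PySem.List.index?_cons_self, Option.getD_some]
        simp only [Nat.cast_zero, PySem.List.pyGet?_zero_cons, Option.getD_some]
        simp only [pvPick, if_pos hc]
      · have hm : (PySem.List.max? ((s :: t).map pvLenI) (fun x => x)).getD 0 = (pvPick t).2 := by
          rw [hmax]; omega
        rw [hm]
        have hsome : (PySem.List.index? (t.map pvLenI) (pvPick t).2).isSome := by
          rw [PySem.List.index?_isSome_iff]; exact hqmem
        obtain ⟨k, hk⟩ := Option.isSome_iff_exists.mp hsome
        have hne : pvLenI s ≠ (pvPick t).2 := by omega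
        rw [List.map_cons, PySem.List.index?_cons_of_ne _ hne, hk, Option.map_some,
          Option.getD_some]
        have hget : (PySem.List.pyGet? (s :: t) (((k + 1 : Nat) : Int))).getD []
            = (PySem.List.pyGet? t ((k : Nat) : Int)).getD [] := by
          simp [PySem.List.pyGet?_natCast]
        rw [hget]
        have hfirst : (PySem.List.pyGet? t ((((PySem.List.index? (t.map pvLenI)
            ((PySem.List.max? (t.map pvLenI) (fun x => x)).getD 0)).getD 0 : Nat)) : Int)).getD []
            = (pvPick t).1 := congrArg Prod.fst IH
        rw [hmaxt, hk, Option.getD_some] at hfirst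
        rw [hfirst]
        simp only [pvPick, if_neg hc]

-- A's loop is pvChunks accumulation
lemma pvAFold (l : List Char) : ∀ (rs : List (List Char)) (cur : List Char),
    (let st := l.foldl pvAStep (rs.map pvLenI, rs, pvLenI cur, cur)
     ((st.1 ++ [st.2.2.1], st.2.1 ++ [st.2.2.2]) : List Int × List (List Char)))
      = ((rs ++ pvChunks l cur).map pvLenI, rs ++ pvChunks l cur) := by
  induction l with
  | nil => intro rs cur; simp [pvChunks]
  | cons c l ih =>
    intro rs cur
    by_cases hd : '0' ≤ c ∧ c ≤ '9'
    · have hmem : c ∈ (['1','2','3','4','5','6','7','8','9','0'] : List Char) :=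
        (pvCharClass c).mpr hd
      have hlen : pvLenI cur + 1 = pvLenI (cur ++ [c]) := by simp [pvLenI]
      have hstep : pvAStep (rs.map pvLenI, rs, pvLenI cur, cur) c
          = (rs.map pvLenI, rs, pvLenI (cur ++ [c]), cur ++ [c]) := by
        simp [pvAStep, hmem, ← hlen]
      rw [List.foldl_cons, hstep]
      have := ih rs (cur ++ [c])
      simp only at this ⊢
      rw [this]
      simp [pvChunks, hd]
    · have hmem : c ∉ (['1','2','3','4','5','6','7','8','9','0'] : List Char) := by
        intro hc; exact hd ((pvCharClass c).mp hc)
      have hstep : pvAStep (rs.map pvLenI, rs, pvLenI cur, cur) c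
          = ((rs ++ [cur]).map pvLenI, rs ++ [cur], pvLenI [], []) := by
        simp [pvAStep, hmem, pvLenI]
      rw [List.foldl_cons, hstep]
      have := ih (rs ++ [cur]) []
      simp only at this ⊢
      rw [this]
      simp [pvChunks, hd]

-- B's loop computes the best chunk directly
lemma pvBFold (l : List Char) : ∀ (best cur : List Char) (blen : Int),
    (let st := l.foldl pvBStep (best, blen, cur, pvLenI cur)
     if st.2.2.2 > st.2.1 then (st.2.2.1, st.2.2.2) else (st.1, st.2.1))
      = (if (pvPick (pvChunks l cur)).2 > blen then pvPick (pvChunks l cur) else (best, blen)) := by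
  induction l with
  | nil =>
    intro best cur blen
    have : pvPick [cur] = (cur, pvLenI cur) := by
      simp [pvPick, pvLenI]
    simp [pvChunks, this]
  | cons c l ih =>
    intro best cur blen
    by_cases hd : '0' ≤ c ∧ c ≤ '9'
    · have hlen : pvLenI cur + 1 = pvLenI (cur ++ [c]) := by simp [pvLenI]
      simp only [List.foldl_cons, pvBStep, if_pos hd]
      rw [hlen]
      have := ih best (cur ++ [c]) blen
      simp only at this ⊢
      rw [this]
      simp [pvChunks, hd]
    · simp only [List.foldl_cons, pvBStep, if_neg hd]
      have e0 : (0 : Int) = pvLenI [] := by simp [pvLenI]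
      have hq2 := pvPick_snd_nonneg (pvChunks l [])
      have hchunks : pvChunks (c :: l) cur = cur :: pvChunks l [] := by
        simp [pvChunks, hd]
      rw [hchunks]
      by_cases h1 : pvLenI cur > blen
      · simp only [if_pos h1, e0]
        have := ih cur [] (pvLenI cur)
        simp only at this ⊢
        rw [this]
        simp only [pvPick]
        split_ifs <;> first | rfl | omega
      · simp only [if_neg h1, e0]
        have := ih best [] blen
        simp only at this ⊢
        rw [this]
        simp only [pvPick]
        split_ifs <;> first | rfl | omega

-- ===== VERDICT (by name: the statement is the Claim_ definition above) =====
theorem notuse_isnumeric_spec : Claim_equal_notuse_isnumeric := by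
  intro str _
  unfold Spec_notuse_isnumeric notuse_isnumeric notuse_isnumeric_alt
  have hA := pvAFold str.toList [] []
  have hB := pvBFold str.toList [] [] 0
  simp only [List.map_nil, show pvLenI ([] : List Char) = 0 from rfl] at hA hB
  have h1 := congrArg Prod.fst hA
  have h2 := congrArg Prod.snd hA
  simp only [List.nil_append] at h1 h2 hB ⊢
  rw [h1, h2]
  have hfin := pvFin_eq_pick (pvChunks str.toList []) (pvChunks_ne_nil _ _)
  have hf1 := congrArg Prod.fst hfin
  have hf2 := congrArg Prod.snd hfin
  simp only at hf1 hf2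
  rw [hf1, hf2, hB]
  by_cases hpos : (pvPick (pvChunks str.toList [])).2 > 0
  · rw [if_pos hpos]
  · rw [if_neg hpos]
    have hnn := pvPick_snd_nonneg (pvChunks str.toList [])
    have hz : (pvPick (pvChunks str.toList [])).2 = 0 := by omega
    have he : (pvPick (pvChunks str.toList [])).1 = [] := by
      have := pvPick_snd_eq (pvChunks str.toList [])
      rw [hz] at this
      simpa [pvLenI] using this.symm
    rw [hz, he]
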